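-- pv_equiv track=rewrite | github.com/proc-ash/DSA_problems | striver/array/medium/arrange_by_sign.py | arrangeAlternate
-- ===== SOURCE A (Python) =====
-- def arrangeAlternate(array):
--     positive, negative = 0, 1
--     ans = [0] * len(array)
--
--     for element in array:
--         if element < 0:
--             ans[negative] = element
--             negative += 2
--         else:
--             ans[positive] = element
--             positive += 2
--     return ans
-- ===== SOURCE B (Python) =====
-- def arrangeAlternate(array):
--     pos = [x for x in array if x >= 0]
--     neg = [x for x in array if x < 0]
--     ans = []
--     for p, n in zip(pos, neg):
--         ans.append(p)
--         ans.append(n)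
--     if len(neg) < len(pos):
--         ans.append(pos[-1])
--     return ans
-- ===== Notes on version B (the rewrite author's own statement) =====
-- stated objective: idiomatic
-- what changed: Replaces the single pass with two slot counters and indexed writes into a preallocated list by a partition into positives and negatives followed by a zip-interleave that builds the result front-to-back.
import Mathlib
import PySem

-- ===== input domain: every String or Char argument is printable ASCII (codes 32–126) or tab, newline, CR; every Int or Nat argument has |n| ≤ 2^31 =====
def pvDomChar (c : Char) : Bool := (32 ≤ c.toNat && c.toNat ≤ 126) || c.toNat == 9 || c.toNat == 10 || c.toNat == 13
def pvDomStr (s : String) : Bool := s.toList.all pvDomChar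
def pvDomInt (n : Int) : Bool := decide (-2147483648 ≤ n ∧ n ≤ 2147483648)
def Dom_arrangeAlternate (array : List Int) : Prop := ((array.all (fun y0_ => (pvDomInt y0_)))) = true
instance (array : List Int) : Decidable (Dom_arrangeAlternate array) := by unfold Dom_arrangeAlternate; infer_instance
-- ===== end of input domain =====

-- B replaces A's single pass with two slot counters and indexed writes into a preallocated list
-- by a partition into positives and negatives followed by a zip-interleave building the result
-- front-to-back (objective: idiomatic; same cost).


-- ===== PORT A =====
-- Literal port of A: ans = [0]*len(array); one pass writing positives at 0,2,4,… and
-- negatives at 1,3,5,…. The two indices start at 0 and 1 and only ever grow, so they are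
-- never negative and .toNat is exact; Python's `ans[i] = v` raises IndexError for i ≥ len
-- (List.set is a no-op there) — exactly those inputs are excluded by Pre_ below.
def arrangeAlternate (array : List Int) : List Int :=
  (array.foldl
    (fun (st : Int × Int × List Int) element =>
      if element < 0 then (st.1, st.2.1 + 2, st.2.2.set st.2.1.toNat element)
      else (st.1 + 2, st.2.1, st.2.2.set st.1.toNat element))
    (0, 1, List.replicate array.length 0)).2.2

-- ===== PORT B =====
-- Literal port of Source B: filter positives and negatives, interleave them with zip,
-- append the leftover positive (pos[-1] = getLast!) when there is one.
def arrangeAlternate_alt (array : List Int) : List Int :=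
  let pos := array.filter (fun x => decide (0 ≤ x))
  let neg := array.filter (fun x => decide (x < 0))
  let ans := (pos.zip neg).foldl (fun acc pq => acc ++ [pq.1, pq.2]) []
  if neg.length < pos.length then ans ++ [pos.getLast!] else ans

-- ===== PRECONDITION & SPEC =====
-- Pre_ excludes exactly the inputs on which A raises IndexError: A returns iff the number of
-- nonnegative elements is ⌈n/2⌉ (otherwise some write lands at an index ≥ len(array)).
def Pre_arrangeAlternate (array : List Int) : Prop :=
  array.countP (fun x => decide (0 ≤ x)) = (array.length + 1) / 2
instance (array : List Int) : Decidable (Pre_arrangeAlternate array) := by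
  unfold Pre_arrangeAlternate; infer_instance
def pvWitness_arrangeAlternate : List Int := [1, -2, 3]
def Spec_arrangeAlternate (array : List Int) (out : List Int) : Prop := out = arrangeAlternate_alt array
instance (array : List Int) (out : List Int) : Decidable (Spec_arrangeAlternate array out) := by unfold Spec_arrangeAlternate; infer_instance

-- ===== CLAIM (what is proved, stated in full; the proofs are below) =====
def Claim_equal_arrangeAlternate : Prop := ∀ (array : List Int), Dom_arrangeAlternate array → Pre_arrangeAlternate array → Spec_arrangeAlternate array (arrangeAlternate array)

-- ===== LEMMAS AND PROOFS =====

-- write xs into ans at positions i, i+2, i+4, … (what A's two counters do for one sign)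
def wr : List Int → Nat → List Int → List Int
  | ans, _, [] => ans
  | ans, i, x :: xs => wr (ans.set i x) (i + 2) xs

-- the common interleaved shape both programs produce
def ilv : List Int → List Int → List Int
  | x :: xs, y :: ys => x :: y :: ilv xs ys
  | xs, [] => xs
  | [], _ :: _ => []

theorem wr_set_comm (xs : List Int) (ans : List Int) (i j : Nat) (v : Int)
    (h : i % 2 ≠ j % 2) : wr (ans.set j v) i xs = (wr ans i xs).set j v := by
  induction xs generalizing ans i with
  | nil => rfl
  | cons x xs ih =>
    have hij : i ≠ j := fun e => h (e ▸ rfl)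
    simp only [wr]
    rw [List.set_comm v x hij.symm]
    exact ih (ans.set i x) (i + 2) (by omega)

theorem wr_cons (c : Int) (l : List Int) (i : Nat) (xs : List Int) :
    wr (c :: l) (i + 1) xs = c :: wr l i xs := by
  induction xs generalizing l i with
  | nil => rfl
  | cons x xs ih =>
    simp only [wr, List.set_cons_succ]
    exact ih (l.set i x) (i + 2)

theorem wr_cons2 (c d : Int) (l : List Int) (i : Nat) (xs : List Int) :
    wr (c :: d :: l) (i + 2) xs = c :: d :: wr l i xs := by
  rw [show i + 2 = (i + 1) + 1 from rfl, wr_cons, wr_cons]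

theorem foldA_eq_wr (l : List Int) (p q : Nat) (ans : List Int) (h : p % 2 ≠ q % 2) :
    (l.foldl
      (fun (st : Int × Int × List Int) element =>
        if element < 0 then (st.1, st.2.1 + 2, st.2.2.set st.2.1.toNat element)
        else (st.1 + 2, st.2.1, st.2.2.set st.1.toNat element))
      ((p : Int), (q : Int), ans)).2.2
    = wr (wr ans p (l.filter (fun x => decide (0 ≤ x)))) q (l.filter (fun x => decide (x < 0))) := by
  induction l generalizing p q ans with
  | nil => rfl
  | cons x l ih =>
    by_cases hx : x < 0
    · have hnp : ¬ (0 ≤ x) := by omega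
      simp only [List.foldl_cons, if_pos hx, Int.toNat_natCast, List.filter_cons,
        decide_eq_true_eq, if_neg hnp]
      have hc : ((q : Int) + 2) = ((q + 2 : Nat) : Int) := by push_cast; ring
      rw [hc, ih p (q + 2) (ans.set q x) (by omega), wr_set_comm _ ans p q x h]
      rfl
    · have hp0 : (0 : Int) ≤ x := by omega
      simp only [List.foldl_cons, if_neg hx, Int.toNat_natCast, List.filter_cons,
        decide_eq_true_eq, if_pos hp0, if_neg hx]
      have hc : ((p : Int) + 2) = ((p + 2 : Nat) : Int) := by push_cast; ring
      rw [hc, ih (p + 2) q (ans.set p x) (by omega)]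
      rfl

theorem wr_wr_eq_ilv (neg : List Int) : ∀ pos : List Int, neg.length ≤ pos.length →
    pos.length ≤ neg.length + 1 →
    wr (wr (List.replicate (pos.length + neg.length) 0) 0 pos) 1 neg = ilv pos neg := by
  induction neg with
  | nil =>
    intro pos h1 h2
    cases pos with
    | nil => rfl
    | cons x xs =>
      cases xs with
      | nil => rfl
      | cons y l =>
        exfalso; simp only [List.length_cons, List.length_nil] at h2; omega
  | cons y ys ih =>
    intro pos h1 h2
    cases pos with
    | nil => exfalso; simp only [List.length_cons, List.length_nil] at h1; omega
    | cons x xs =>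
      have hlen : (x :: xs).length + (y :: ys).length = xs.length + ys.length + 2 := by
        simp only [List.length_cons]; omega
      rw [hlen]
      show wr (wr (0 :: 0 :: List.replicate (xs.length + ys.length) 0) 0 (x :: xs)) 1 (y :: ys)
        = x :: y :: ilv xs ys
      have e1 : wr (0 :: 0 :: List.replicate (xs.length + ys.length) 0) 0 (x :: xs)
          = x :: 0 :: wr (List.replicate (xs.length + ys.length) 0) 0 xs := by
        simp only [wr, List.set_cons_zero]
        exact wr_cons2 x 0 _ 0 xs
      rw [e1]
      have e2 : wr (x :: 0 :: wr (List.replicate (xs.length + ys.length) 0) 0 xs) 1 (y :: ys)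
          = x :: y :: wr (wr (List.replicate (xs.length + ys.length) 0) 0 xs) 1 ys := by
        simp only [wr, List.set_cons_succ, List.set_cons_zero]
        exact wr_cons2 x y _ 1 ys
      rw [e2, ih xs (by simp only [List.length_cons] at h1; omega)
        (by simp only [List.length_cons] at h2; omega)]

theorem getLast!_cons_cons (x b : Int) (l : List Int) :
    (x :: b :: l).getLast! = (b :: l).getLast! := by
  simp [List.getLast!, List.getLast_cons]

theorem B_eq_ilv (neg : List Int) : ∀ pos : List Int, neg.length ≤ pos.length →
    pos.length ≤ neg.length + 1 →
    (if neg.length < pos.length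
      then (pos.zip neg).foldl (fun acc pq => acc ++ [pq.1, pq.2]) [] ++ [pos.getLast!]
      else (pos.zip neg).foldl (fun acc pq => acc ++ [pq.1, pq.2]) []) = ilv pos neg := by
  induction neg with
  | nil =>
    intro pos h1 h2
    cases pos with
    | nil => rfl
    | cons x xs =>
      cases xs with
      | nil => simp [ilv]
      | cons y l =>
        exfalso; simp only [List.length_cons, List.length_nil] at h2; omega
  | cons y ys ih =>
    intro pos h1 h2
    cases pos with
    | nil => exfalso; simp only [List.length_cons, List.length_nil] at h1; omega
    | cons x xs =>
      by_cases hc : ys.length < xs.length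
      · have hxs : xs ≠ [] := by intro e; rw [e] at hc; simp at hc
        obtain ⟨b, l, rfl⟩ : ∃ b l, xs = b :: l := by
          cases xs with
          | nil => exact absurd rfl hxs
          | cons b l => exact ⟨b, l, rfl⟩
        have hrec := ih (b :: l) (Nat.le_of_lt hc)
          (by simp only [List.length_cons] at h2 ⊢; omega)
        rw [if_pos hc] at hrec
        rw [if_pos (by simp only [List.length_cons] at hc ⊢; omega :
          (y :: ys).length < (x :: b :: l).length)]
        simp only [List.zip_cons_cons, PySem.List.foldl_append_eq_flatMap, List.flatMap_cons,
          List.nil_append] at hrec ⊢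
        rw [List.append_assoc, getLast!_cons_cons, hrec]
        rfl
      · have hrec := ih xs (by simp only [List.length_cons] at h1; omega)
          (by simp only [List.length_cons] at h2; omega)
        rw [if_neg hc] at hrec
        rw [if_neg (by simp only [List.length_cons]; omega :
          ¬ (y :: ys).length < (x :: xs).length)]
        simp only [List.zip_cons_cons, PySem.List.foldl_append_eq_flatMap, List.flatMap_cons,
          List.nil_append] at hrec ⊢
        rw [hrec]
        rfl

-- ===== VERDICT (by name: the statement is the Claim_ definition above) =====
theorem arrangeAlternate_spec : Claim_equal_arrangeAlternate := by
  intro array _ hpre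
  have hcount : (array.filter (fun x => decide (0 ≤ x))).length = (array.length + 1) / 2 := by
    have h := hpre
    unfold Pre_arrangeAlternate at h
    rwa [List.countP_eq_length_filter] at h
  have hsplit : array.length = (array.filter (fun x => decide (0 ≤ x))).length
      + (array.filter (fun x => decide (x < 0))).length := by
    have h := List.length_eq_length_filter_add (l := array) (fun x => decide (0 ≤ x))
    have e : array.filter (fun x => !decide (0 ≤ x)) = array.filter (fun x => decide (x < 0)) :=
      List.filter_congr (fun x _ => by
        by_cases hx : (0 : Int) ≤ x
        · have hn : ¬ x < 0 := by omega
          simp [hx, hn]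
        · have hn : x < 0 := by omega
          simp [hx, hn])
    rw [e] at h
    exact h
  have h1 : (array.filter (fun x => decide (x < 0))).length
      ≤ (array.filter (fun x => decide (0 ≤ x))).length := by omega
  have h2 : (array.filter (fun x => decide (0 ≤ x))).length
      ≤ (array.filter (fun x => decide (x < 0))).length + 1 := by omega
  have hA : arrangeAlternate array
      = wr (wr (List.replicate array.length 0) 0 (array.filter (fun x => decide (0 ≤ x)))) 1
          (array.filter (fun x => decide (x < 0))) := by
    have h := foldA_eq_wr array 0 1 (List.replicate array.length 0) (by omega)
    simp only [Nat.cast_zero, Nat.cast_one] at h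
    exact h
  have hB : arrangeAlternate_alt array
      = ilv (array.filter (fun x => decide (0 ≤ x))) (array.filter (fun x => decide (x < 0))) := by
    unfold arrangeAlternate_alt
    exact B_eq_ilv (array.filter (fun x => decide (x < 0)))
      (array.filter (fun x => decide (0 ≤ x))) h1 h2
  unfold Spec_arrangeAlternate
  rw [hA, hB, hsplit]
  exact wr_wr_eq_ilv (array.filter (fun x => decide (x < 0)))
    (array.filter (fun x => decide (0 ≤ x))) h1 h2
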